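-- pv_equiv track=rewrite | github.com/katya-avem/soviet_plays | src/txt_to_xml.py | mark_up_set
-- ===== SOURCE A (Python) =====
-- def find_block_between_empty_lines(lines: list, block_index: int) -> tuple:
--     count = 0
--     block_start_index = -1
--     block_end_index = -1
--     block_lines = []
--
--     for index, line in enumerate(lines):
--         if len(line.strip()) == 0:
--             count += 1
--
--             if count == block_index + 1:
--                 block_end_index = index
--                 break
--
--             continue
--
--         if count == block_index:
--             if block_start_index == -1:
--                 block_start_index = index
--
--             block_lines.append(line)
--
--     if block_start_index != -1 and block_end_index == -1:
--         block_end_index = len(lines)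
--
--     return block_start_index, block_end_index, block_lines
--
-- def mark_up_set(lines: list) -> list:
--     block_start_index, block_end_index, block_lines = find_block_between_empty_lines(lines, 2)
--
--     assert block_start_index != -1
--     assert block_end_index != -1
--
--     return [
--         *lines[:block_start_index],
--         "<set>\n",
--         *[f"<p>{line.strip()}</p>\n" for line in block_lines],
--         "</set>\n",
--         *lines[block_end_index:]
--     ]
-- ===== SOURCE B (Python) =====
-- def mark_up_set(lines: list) -> list:
--     blanks = [i for i, line in enumerate(lines) if not line.strip()]
--     assert len(blanks) >= 2
--     start = blanks[1] + 1
--     end = blanks[2] if len(blanks) > 2 else len(lines)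
--     assert start < end
--     return [
--         *lines[:start],
--         "<set>\n",
--         *[f"<p>{line.strip()}</p>\n" for line in lines[start:end]],
--         "</set>\n",
--         *lines[end:],
--     ]
-- ===== Notes on version B (the rewrite author's own statement) =====
-- stated objective: alternative
-- what changed: A runs a stateful scanner (blank counter, start/end sentinels, accumulated block lines, break, post-loop patch) via a general helper; B first builds the list of blank-line positions with one comprehension and then derives the block boundaries by indexing into it and reconstructs the output with plain slices.
import Mathlib
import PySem

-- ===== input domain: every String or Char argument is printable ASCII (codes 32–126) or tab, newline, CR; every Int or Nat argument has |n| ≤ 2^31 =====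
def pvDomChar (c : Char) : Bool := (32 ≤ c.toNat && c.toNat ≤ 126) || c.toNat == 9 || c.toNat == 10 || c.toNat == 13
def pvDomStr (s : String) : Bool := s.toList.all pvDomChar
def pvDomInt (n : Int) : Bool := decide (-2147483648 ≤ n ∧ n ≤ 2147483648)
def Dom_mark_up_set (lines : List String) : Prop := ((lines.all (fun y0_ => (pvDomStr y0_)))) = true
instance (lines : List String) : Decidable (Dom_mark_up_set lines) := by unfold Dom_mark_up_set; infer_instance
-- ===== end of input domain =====

-- B replaces A's stateful scanner (counter/sentinels/break/post-patch) by a blank-position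
-- index list plus slice arithmetic; same O(n) cost, different decomposition.


-- ===== PORT A =====
-- the for-loop of find_block_between_empty_lines, state = (count, block_start_index, block_end_index, block_lines)
def fbeAux (rest : List String) (index : Nat) (blockIndex count s e : Int)
    (acc : List String) : Int × Int × List String :=
  match rest with
  | [] => (s, e, acc)
  | line :: rs =>
    if (PySem.Chars.strip line.toList).length = 0 then
      let count' := count + 1
      if count' = blockIndex + 1 then (s, (index : Int), acc)   -- block_end_index = index; break
      else fbeAux rs (index + 1) blockIndex count' s e acc       -- continue
    else if count = blockIndex then
      let s' := if s = -1 then (index : Int) else s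
      fbeAux rs (index + 1) blockIndex count s' e (acc ++ [line])
    else fbeAux rs (index + 1) blockIndex count s e acc

def find_block_between_empty_lines (lines : List String) (block_index : Int) :
    Int × Int × List String :=
  let r := fbeAux lines 0 block_index 0 (-1) (-1) []
  let e := if r.1 ≠ -1 ∧ r.2.1 = -1 then (PySem.List.len lines) else r.2.1
  (r.1, e, r.2.2)

def mark_up_set (lines : List String) : List String :=
  let r := find_block_between_empty_lines lines 2
  -- Python asserts r.1 ≠ -1 and r.2.1 ≠ -1 (AssertionError otherwise); those inputs are outside Pre_
  if r.1 = -1 ∨ r.2.1 = -1 then []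
  else
    PySem.List.slice lines none (some r.1)
      ++ ["<set>\n"]
      ++ r.2.2.map (fun line =>
            String.ofList ("<p>".toList ++ PySem.Chars.strip line.toList ++ "</p>\n".toList))
      ++ ["</set>\n"]
      ++ PySem.List.slice lines (some r.2.1) none

-- ===== PORT B =====
def mark_up_set_alt (lines : List String) : List String :=
  let blanks := (PySem.List.enumerate lines 0).filterMap
      (fun p => if PySem.Chars.strip p.2.toList == [] then some p.1 else none)
  match blanks with
  | _b0 :: b1 :: rest =>
    let start := b1 + 1
    let stop := match rest with
      | b2 :: _ => b2
      | [] => PySem.List.len lines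
    -- Python asserts start < stop (AssertionError otherwise); outside Pre_
    if start < stop then
      PySem.List.slice lines none (some start)
        ++ ["<set>\n"]
        ++ (PySem.List.slice lines (some start) (some stop)).map (fun line =>
              String.ofList ("<p>".toList ++ PySem.Chars.strip line.toList ++ "</p>\n".toList))
        ++ ["</set>\n"]
        ++ PySem.List.slice lines (some stop) none
    else []               -- unreachable under Pre_ (assert start < stop fires in Python)
  | _ => []                -- assert len(blanks) >= 2 fires in Python; outside Pre_

-- ===== PRECONDITION & SPEC =====
-- pvNB l = true ↔ the line is non-blank (its strip is nonempty)
def pvNB (l : String) : Bool := !(PySem.Chars.strip l.toList == [])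

-- Pre_ holds iff the text after the second blank line starts with a non-blank line;
-- on its complement A (and B) raise AssertionError (fewer than two blank lines, or an
-- empty third blank-delimited block), so nothing is claimed there.
def Pre_mark_up_set (lines : List String) : Prop :=
  ((((lines.dropWhile pvNB).drop 1).dropWhile pvNB).drop 1).takeWhile pvNB ≠ []
instance (lines : List String) : Decidable (Pre_mark_up_set lines) := by
  unfold Pre_mark_up_set; infer_instance

def pvWitness_mark_up_set : List String := ["x", "", "author", "", "speech one", "speech two", "speech three"]

def Spec_mark_up_set (lines : List String) (out : List String) : Prop := out = mark_up_set_alt lines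
instance (lines : List String) (out : List String) : Decidable (Spec_mark_up_set lines out) := by
  unfold Spec_mark_up_set; infer_instance

-- ===== CLAIM (what is proved, stated in full; the proofs are below) =====
def Claim_equal_mark_up_set : Prop := ∀ (lines : List String), Dom_mark_up_set lines → Pre_mark_up_set lines → Spec_mark_up_set lines (mark_up_set lines)

-- ===== LEMMAS AND PROOFS =====

-- the common output shape both ports reduce to, for block [st, en) = t
def pvOut (L : List String) (st en : Nat) (t : List String) : List String :=
  PySem.List.slice L none (some (st : Int))
    ++ ["<set>\n"]
    ++ t.map (fun line =>
          String.ofList ("<p>".toList ++ PySem.Chars.strip line.toList ++ "</p>\n".toList))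
    ++ ["</set>\n"]
    ++ PySem.List.slice L (some (en : Int)) none

theorem pv_blank_iff (l : String) : ((PySem.Chars.strip l.toList).length = 0) ↔ pvNB l = false := by
  simp [pvNB, List.length_eq_zero_iff]

-- ---- A-side loop characterisation ----

theorem fbe_skip (c : Int) (hc : c ≠ 2) : ∀ (t ys : List String), (∀ l ∈ t, pvNB l = true) →
    ∀ (i : Nat) (s e : Int) (a : List String),
    fbeAux (t ++ ys) i 2 c s e a = fbeAux ys (i + t.length) 2 c s e a := by
  intro t
  induction t with
  | nil => intro ys _ i s e a; simp
  | cons l t ih =>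
    intro ys ht i s e a
    have hl : ¬ ((PySem.Chars.strip l.toList).length = 0) := by
      rw [pv_blank_iff]; simp [ht l (by simp)]
    simp only [List.cons_append, fbeAux, if_neg hl, if_neg hc]
    rw [ih ys (fun x hx => ht x (by simp [hx])) (i + 1) s e a]
    congr 1
    simp; omega

theorem fbe_blank (c : Int) (hc : ¬ (c + 1 = 3)) (z : String) (hz : pvNB z = false)
    (ys : List String) (i : Nat) (s e : Int) (a : List String) :
    fbeAux (z :: ys) i 2 c s e a = fbeAux ys (i + 1) 2 (c + 1) s e a := by
  have h0 : (PySem.Chars.strip z.toList).length = 0 := (pv_blank_iff z).mpr hz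
  simp only [fbeAux, if_pos h0]
  rw [if_neg (show ¬ c + 1 = 2 + 1 by omega)]


theorem fbe_break (z : String) (hz : pvNB z = false) (ys : List String) (i : Nat)
    (s e : Int) (a : List String) :
    fbeAux (z :: ys) i 2 2 s e a = (s, (i : Int), a) := by
  have h0 : (PySem.Chars.strip z.toList).length = 0 := (pv_blank_iff z).mpr hz
  simp [fbeAux, h0]

theorem fbe_run (s : Int) (hs : s ≠ -1) : ∀ (t ys : List String),
    (∀ l ∈ t, pvNB l = true) → (∀ z ∈ ys.head?, pvNB z = false) →
    ∀ (i : Nat) (a : List String),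
    fbeAux (t ++ ys) i 2 2 s (-1) a
      = (s, (if ys.isEmpty then (-1 : Int) else ((i + t.length : Nat) : Int)), a ++ t) := by
  intro t
  induction t with
  | nil =>
    intro ys _ hys i a
    cases ys with
    | nil => simp [fbeAux]
    | cons z zs =>
      have hz := hys z (by simp)
      rw [List.nil_append, fbe_break z hz]
      simp
  | cons l t ih =>
    intro ys ht hys i a
    have hl : ¬ ((PySem.Chars.strip l.toList).length = 0) := by
      rw [pv_blank_iff]; simp [ht l (by simp)]
    simp only [List.cons_append, fbeAux, if_neg hl, if_true, if_neg hs]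
    rw [ih ys (fun x hx => ht x (by simp [hx])) hys (i + 1) (a ++ [l])]
    refine congrArg (fun p => (s, p)) ?_
    refine congrArg₂ Prod.mk ?_ (by simp)
    split
    · rfl
    · congr 1; simp; omega

theorem fbe_start (t ys : List String) (ht : ∀ l ∈ t, pvNB l = true) (htne : t ≠ [])
    (hys : ∀ z ∈ ys.head?, pvNB z = false) (i : Nat) :
    fbeAux (t ++ ys) i 2 2 (-1) (-1) []
      = ((i : Int), (if ys.isEmpty then (-1 : Int) else ((i + t.length : Nat) : Int)), t) := by
  cases t with
  | nil => exact absurd rfl htne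
  | cons l t =>
    have hl : ¬ ((PySem.Chars.strip l.toList).length = 0) := by
      rw [pv_blank_iff]; simp [ht l (by simp)]
    simp only [List.cons_append, fbeAux, if_neg hl, if_true, List.nil_append]
    rw [fbe_run (i : Int) (by omega) t ys (fun x hx => ht x (by simp [hx])) hys (i + 1) [l]]
    refine congrArg (fun p => ((i : Int), p)) ?_
    refine congrArg₂ Prod.mk ?_ (by simp)
    split
    · rfl
    · congr 1; simp; omega

-- ---- B-side blank-position list characterisation ----

theorem blanks_nil (i : Int) :
    (PySem.List.enumerate ([] : List String) i).filterMap
      (fun p => if PySem.Chars.strip p.2.toList == [] then some p.1 else none) = [] := by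
  simp [PySem.List.enumerate_nil]

theorem blanks_blank_cons (z : String) (hz : pvNB z = false) (ys : List String) (i : Int) :
    (PySem.List.enumerate (z :: ys) i).filterMap
      (fun p => if PySem.Chars.strip p.2.toList == [] then some p.1 else none)
    = i :: (PySem.List.enumerate ys (i + 1)).filterMap
      (fun p => if PySem.Chars.strip p.2.toList == [] then some p.1 else none) := by
  have h0 : PySem.Chars.strip z.toList = [] := by simpa [pvNB] using hz
  simp [PySem.List.enumerate_cons, h0]

theorem blanks_skip : ∀ (t ys : List String), (∀ l ∈ t, pvNB l = true) → ∀ (i : Int),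
    (PySem.List.enumerate (t ++ ys) i).filterMap
      (fun p => if PySem.Chars.strip p.2.toList == [] then some p.1 else none)
    = (PySem.List.enumerate ys (i + t.length)).filterMap
      (fun p => if PySem.Chars.strip p.2.toList == [] then some p.1 else none) := by
  intro t
  induction t with
  | nil => intro ys _ i; simp
  | cons l t ih =>
    intro ys ht i
    have hl : ¬ (PySem.Chars.strip l.toList = []) := by simpa [pvNB] using ht l (by simp)
    rw [List.cons_append, PySem.List.enumerate_cons]
    simp only [List.filterMap_cons, beq_iff_eq, if_neg hl]
    simp only [beq_iff_eq] at ih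
    rw [ih ys (fun x hx => ht x (by simp [hx])) (i + 1)]
    congr 2
    simp; omega

-- ---- the two ports on a fully decomposed input ----

theorem A_val (p0 p1 t ys : List String) (z0 z1 : String)
    (hp0 : ∀ l ∈ p0, pvNB l = true) (hz0 : pvNB z0 = false)
    (hp1 : ∀ l ∈ p1, pvNB l = true) (hz1 : pvNB z1 = false)
    (ht : ∀ l ∈ t, pvNB l = true) (htne : t ≠ [])
    (hys : ∀ z ∈ ys.head?, pvNB z = false) :
    mark_up_set (p0 ++ z0 :: (p1 ++ z1 :: (t ++ ys)))
      = pvOut (p0 ++ z0 :: (p1 ++ z1 :: (t ++ ys)))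
          (p0.length + 1 + p1.length + 1) (p0.length + 1 + p1.length + 1 + t.length) t := by
  have h1 : fbeAux (p0 ++ z0 :: (p1 ++ z1 :: (t ++ ys))) 0 2 0 (-1) (-1) []
      = ((↑(p0.length + 1 + p1.length + 1) : Int),
         (if ys.isEmpty then (-1 : Int) else (↑(p0.length + 1 + p1.length + 1 + t.length) : Int)),
         t) := by
    rw [fbe_skip 0 (by decide) p0 _ hp0 0 (-1) (-1) []]
    rw [fbe_blank 0 (by decide) z0 hz0 _ _ _ _ _]
    rw [fbe_skip (0 + 1) (by decide) p1 _ hp1 _ _ _ _]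
    rw [fbe_blank (0 + 1) (by decide) z1 hz1 _ _ _ _ _]
    rw [show ((0 : Int) + 1 + 1) = 2 by decide]
    rw [fbe_start t ys ht htne hys _]
    have hidx : 0 + p0.length + 1 + p1.length + 1 = p0.length + 1 + p1.length + 1 := by omega
    rw [hidx]
  have hA : find_block_between_empty_lines (p0 ++ z0 :: (p1 ++ z1 :: (t ++ ys))) 2
      = ((↑(p0.length + 1 + p1.length + 1) : Int),
         (↑(p0.length + 1 + p1.length + 1 + t.length) : Int), t) := by
    simp only [find_block_between_empty_lines, h1]
    cases ys with
    | nil =>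
      have hlen : PySem.List.len (p0 ++ z0 :: (p1 ++ z1 :: (t ++ ([] : List String))))
          = (↑(p0.length + 1 + p1.length + 1 + t.length) : Int) := by
        simp [PySem.List.len_eq]
        omega
      simp only [List.isEmpty_nil, if_true]
      rw [if_pos ⟨by omega, by trivial⟩, hlen]
    | cons y ys' =>
      simp only [List.isEmpty_cons, Bool.false_eq_true, if_false]
      rw [if_neg (by omega : ¬((↑(p0.length + 1 + p1.length + 1) : Int) ≠ -1
            ∧ (↑(p0.length + 1 + p1.length + 1 + t.length) : Int) = -1))]
  simp only [mark_up_set, hA]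
  rw [if_neg (by omega : ¬((↑(p0.length + 1 + p1.length + 1) : Int) = -1
        ∨ (↑(p0.length + 1 + p1.length + 1 + t.length) : Int) = -1))]
  unfold pvOut
  rfl

theorem B_val (p0 p1 t ys : List String) (z0 z1 : String)
    (hp0 : ∀ l ∈ p0, pvNB l = true) (hz0 : pvNB z0 = false)
    (hp1 : ∀ l ∈ p1, pvNB l = true) (hz1 : pvNB z1 = false)
    (ht : ∀ l ∈ t, pvNB l = true) (htne : t ≠ [])
    (hys : ∀ z ∈ ys.head?, pvNB z = false) :
    mark_up_set_alt (p0 ++ z0 :: (p1 ++ z1 :: (t ++ ys)))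
      = pvOut (p0 ++ z0 :: (p1 ++ z1 :: (t ++ ys)))
          (p0.length + 1 + p1.length + 1) (p0.length + 1 + p1.length + 1 + t.length) t := by
  have hslice : PySem.List.slice (p0 ++ z0 :: (p1 ++ z1 :: (t ++ ys)))
      (some (↑(p0.length + 1 + p1.length + 1) : Int))
      (some (↑(p0.length + 1 + p1.length + 1 + t.length) : Int)) = t := by
    have hP : p0 ++ z0 :: (p1 ++ z1 :: (t ++ ys))
        = (p0 ++ z0 :: (p1 ++ [z1])) ++ (t ++ ys) := by simp
    have hcast : (↑(p0.length + 1 + p1.length + 1 + t.length) : Int)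
        = (↑(p0.length + 1 + p1.length + 1) : Int) + (↑t.length : Int) := by push_cast; ring
    rw [hcast, PySem.List.slice_natCast_add, hP]
    have hPlen : p0.length + 1 + p1.length + 1 = (p0 ++ z0 :: (p1 ++ [z1])).length := by
      simp; omega
    rw [hPlen, List.drop_left, List.take_left]
  have htpos : 0 < t.length := List.length_pos_iff.mpr htne
  have e1 : (0 + (↑p0.length : Int) + 1 + ↑p1.length + 1)
      = (↑(p0.length + 1 + p1.length + 1) : Int) := by push_cast; ring
  cases ys with
  | nil =>
    have hb : (PySem.List.enumerate (p0 ++ z0 :: (p1 ++ z1 :: (t ++ ([] : List String)))) 0).filterMap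
        (fun p => if PySem.Chars.strip p.2.toList == [] then some p.1 else none)
        = [0 + (↑p0.length : Int), 0 + ↑p0.length + 1 + ↑p1.length] := by
      rw [blanks_skip p0 _ hp0 0, blanks_blank_cons z0 hz0 _ _,
          blanks_skip p1 _ hp1 _, blanks_blank_cons z1 hz1 _ _,
          blanks_skip t _ ht _, blanks_nil _]
    have hlen : PySem.List.len (p0 ++ z0 :: (p1 ++ z1 :: (t ++ ([] : List String))))
        = (↑(p0.length + 1 + p1.length + 1 + t.length) : Int) := by
      simp [PySem.List.len_eq]
      omega
    simp only [mark_up_set_alt, hb, hlen, e1]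
    rw [if_pos (by omega : (↑(p0.length + 1 + p1.length + 1) : Int)
          < (↑(p0.length + 1 + p1.length + 1 + t.length) : Int))]
    unfold pvOut
    rw [hslice]
  | cons y ys' =>
    have hy : pvNB y = false := hys y (by simp)
    have e2 : (0 + (↑p0.length : Int) + 1 + ↑p1.length + 1 + ↑t.length)
        = (↑(p0.length + 1 + p1.length + 1 + t.length) : Int) := by push_cast; ring
    have hb : (PySem.List.enumerate (p0 ++ z0 :: (p1 ++ z1 :: (t ++ y :: ys'))) 0).filterMap
        (fun p => if PySem.Chars.strip p.2.toList == [] then some p.1 else none)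
        = (0 + (↑p0.length : Int)) :: (0 + ↑p0.length + 1 + ↑p1.length)
            :: (0 + ↑p0.length + 1 + ↑p1.length + 1 + ↑t.length)
            :: (PySem.List.enumerate ys' (0 + ↑p0.length + 1 + ↑p1.length + 1 + ↑t.length + 1)).filterMap
                 (fun p => if PySem.Chars.strip p.2.toList == [] then some p.1 else none) := by
      rw [blanks_skip p0 _ hp0 0, blanks_blank_cons z0 hz0 _ _,
          blanks_skip p1 _ hp1 _, blanks_blank_cons z1 hz1 _ _,
          blanks_skip t _ ht _, blanks_blank_cons y hy _ _]
    simp only [mark_up_set_alt, hb, e1]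
    rw [show ((↑(p0.length + 1 + p1.length + 1) : Int) + ↑t.length)
          = (↑(p0.length + 1 + p1.length + 1 + t.length) : Int) by push_cast; ring]
    rw [if_pos (by omega : (↑(p0.length + 1 + p1.length + 1) : Int)
          < (↑(p0.length + 1 + p1.length + 1 + t.length) : Int))]
    unfold pvOut
    rw [hslice]

-- ---- Pre_ gives the decomposition ----

theorem pre_decomp (lines : List String) (h : Pre_mark_up_set lines) :
    ∃ p0 z0 p1 z1 t ys, lines = p0 ++ z0 :: (p1 ++ z1 :: (t ++ ys))
      ∧ (∀ l ∈ p0, pvNB l = true) ∧ pvNB z0 = false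
      ∧ (∀ l ∈ p1, pvNB l = true) ∧ pvNB z1 = false
      ∧ (∀ l ∈ t, pvNB l = true) ∧ t ≠ []
      ∧ (∀ z ∈ ys.head?, pvNB z = false) := by
  unfold Pre_mark_up_set at h
  rcases hd0 : lines.dropWhile pvNB with _ | ⟨z0, r0⟩
  · rw [hd0] at h; simp at h
  have hz0 : pvNB z0 = false := by
    have hne : lines.dropWhile pvNB ≠ [] := by rw [hd0]; simp
    have h0 := List.head_dropWhile_not pvNB hne
    rwa [show (lines.dropWhile pvNB).head hne = z0 by simp [hd0]] at h0
  rw [hd0] at h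
  simp only [List.drop_succ_cons, List.drop_zero] at h
  rcases hd1 : r0.dropWhile pvNB with _ | ⟨z1, r1⟩
  · rw [hd1] at h; simp at h
  have hz1 : pvNB z1 = false := by
    have hne : r0.dropWhile pvNB ≠ [] := by rw [hd1]; simp
    have h0 := List.head_dropWhile_not pvNB hne
    rwa [show (r0.dropWhile pvNB).head hne = z1 by simp [hd1]] at h0
  rw [hd1] at h
  simp only [List.drop_succ_cons, List.drop_zero] at h
  have hLa : lines = lines.takeWhile pvNB ++ z0 :: r0 := by
    conv_lhs => rw [← List.takeWhile_append_dropWhile (p := pvNB) (l := lines)]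
    rw [hd0]
  have hLb : r0 = r0.takeWhile pvNB ++ z1 :: r1 := by
    conv_lhs => rw [← List.takeWhile_append_dropWhile (p := pvNB) (l := r0)]
    rw [hd1]
  have hLc : r1 = r1.takeWhile pvNB ++ r1.dropWhile pvNB :=
    (List.takeWhile_append_dropWhile (p := pvNB) (l := r1)).symm
  refine ⟨lines.takeWhile pvNB, z0, r0.takeWhile pvNB, z1, r1.takeWhile pvNB, r1.dropWhile pvNB,
    ?_, fun l hl => List.mem_takeWhile_imp hl, hz0,
    fun l hl => List.mem_takeWhile_imp hl, hz1,
    fun l hl => List.mem_takeWhile_imp hl, h, ?_⟩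
  · calc lines = lines.takeWhile pvNB ++ z0 :: r0 := hLa
      _ = lines.takeWhile pvNB ++ z0 :: (r0.takeWhile pvNB ++ z1 :: r1) := by
          exact congrArg (fun x => lines.takeWhile pvNB ++ z0 :: x) hLb
      _ = lines.takeWhile pvNB ++ z0 :: (r0.takeWhile pvNB
            ++ z1 :: (r1.takeWhile pvNB ++ r1.dropWhile pvNB)) := by
          exact congrArg (fun x => lines.takeWhile pvNB ++ z0 :: (r0.takeWhile pvNB ++ z1 :: x)) hLc
  · intro z hz
    rcases hys' : r1.dropWhile pvNB with _ | ⟨y, ys'⟩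
    · rw [hys'] at hz; simp at hz
    have hne : r1.dropWhile pvNB ≠ [] := by rw [hys']; simp
    have hy := List.head_dropWhile_not pvNB hne
    rw [hys'] at hz
    simp at hz
    rwa [show (r1.dropWhile pvNB).head hne = z by simp [hys', hz]] at hy

-- ===== VERDICT (by name: the statement is the Claim_ definition above) =====
theorem mark_up_set_spec : Claim_equal_mark_up_set := by
  intro lines _ hpre
  unfold Spec_mark_up_set
  obtain ⟨p0, z0, p1, z1, t, ys, hL, hp0, hz0, hp1, hz1, ht, htne, hys⟩ := pre_decomp lines hpre
  subst hL
  rw [A_val p0 p1 t ys z0 z1 hp0 hz0 hp1 hz1 ht htne hys,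
      B_val p0 p1 t ys z0 z1 hp0 hz0 hp1 hz1 ht htne hys]
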